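-- pv_equiv track=rewrite | github.com/axolotl-ai-cloud/axolotl | src/axolotl/utils/data/utils.py | truncate_long_seq
-- ===== SOURCE A (Python) =====
-- def truncate_long_seq(sample, sequence_len=2048):
--     """
--     Truncate samples whose sequence length is too long (> sequence_len).
--     Modifies the sample in-place and returns the modified sample.
--     """
--     input_ids = sample["input_ids"]
--
--     # Batched (input_ids is a list of lists)
--     for i, seq in enumerate(input_ids):
--         length = len(seq)
--         if length > sequence_len:
--             sample["input_ids"][i] = seq[:sequence_len]
--             if "attention_mask" in sample:
--                 sample["attention_mask"][i] = sample["attention_mask"][i][:sequence_len]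
--             if "labels" in sample:
--                 sample["labels"][i] = sample["labels"][i][:sequence_len]
--             if "position_ids" in sample:
--                 sample["position_ids"][i] = sample["position_ids"][i][:sequence_len]
--     return sample
-- ===== SOURCE B (Python) =====
-- PARALLEL_FIELDS = ("input_ids", "attention_mask", "labels", "position_ids")
--
--
-- def truncate_long_seq(sample, sequence_len=2048):
--     """
--     Truncate samples whose sequence length is too long (> sequence_len).
--     Modifies the sample in-place and returns the modified sample.
--     """
--     long_rows = {i for i, seq in enumerate(sample["input_ids"]) if len(seq) > sequence_len}
--     for key, col in sample.items():
--         if key in PARALLEL_FIELDS: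
--             sample[key] = [seq[:sequence_len] if i in long_rows else seq
--                            for i, seq in enumerate(col)]
--     return sample
-- ===== Notes on version B (the rewrite author's own statement) =====
-- stated objective: alternative
-- what changed: B replaces A's row-major in-place cell surgery (indexed writes col[i] = col[i][:L] behind four inline key branches) with a functional rebuild: it computes the set of too-long row indices once, then rebuilds every parallel column wholesale as a new list via a comprehension gated by set membership, assigning whole columns instead of cells.
import Mathlib
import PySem

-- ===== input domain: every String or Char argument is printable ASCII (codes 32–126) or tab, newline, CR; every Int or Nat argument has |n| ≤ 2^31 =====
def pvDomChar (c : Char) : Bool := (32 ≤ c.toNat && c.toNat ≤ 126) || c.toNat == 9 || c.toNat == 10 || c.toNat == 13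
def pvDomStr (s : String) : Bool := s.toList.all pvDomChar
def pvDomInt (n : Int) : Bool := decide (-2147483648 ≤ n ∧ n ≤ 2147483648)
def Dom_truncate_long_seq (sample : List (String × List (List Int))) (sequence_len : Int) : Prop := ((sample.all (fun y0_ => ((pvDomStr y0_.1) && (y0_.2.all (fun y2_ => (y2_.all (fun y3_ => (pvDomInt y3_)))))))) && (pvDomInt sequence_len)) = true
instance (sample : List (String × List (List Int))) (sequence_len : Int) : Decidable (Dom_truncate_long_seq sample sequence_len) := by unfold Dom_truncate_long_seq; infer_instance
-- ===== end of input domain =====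

-- B rebuilds every parallel column wholesale (a map gated by a precomputed set of too-long row
-- indices) instead of A's row-major in-place indexed cell writes; both Pythons mutate `sample` in
-- place — the equivalence proved here is about the returned value (the same mapping in both).


-- assoc-list model of `sample[key][i] = …` on a Python dict: replace the value stored under the
-- first entry with key `k` by `f` of it; a no-op when the key is absent (exact for distinct keys,
-- which is all a Python dict can present — Pre_ excludes duplicates).
def pvModifyVal (k : String) (f : List (List Int) → List (List Int)) :
    List (String × List (List Int)) → List (String × List (List Int))
  | [] => []
  | (k', v) :: rest => if k' = k then (k', f v) :: rest else (k', v) :: pvModifyVal k f rest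

-- `col[i] = col[i][:sequence_len]` (reading col[i] out of range raises IndexError in Python —
-- excluded by Pre_; here the read defaults to [] and the out-of-range write is a no-op).
def pvCell (sequence_len i : Int) (col : List (List Int)) : List (List Int) :=
  PySem.List.pySetD col i (PySem.List.slice ((PySem.List.pyGet? col i).getD []) none (some sequence_len))

-- ===== PORT A =====
def truncate_long_seq (sample : List (String × List (List Int))) (sequence_len : Int) :
    List (String × List (List Int)) :=
  -- sample["input_ids"]: KeyError when absent — excluded by Pre_
  let input_ids := (List.lookup "input_ids" sample).getD []
  (PySem.List.enumerate input_ids).foldl (fun st p =>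
    if (p.2.length : Int) > sequence_len then
      let st1 := pvModifyVal "input_ids"
        (fun col => PySem.List.pySetD col p.1 (PySem.List.slice p.2 none (some sequence_len))) st
      let st2 := if (List.lookup "attention_mask" st1).isSome then
        pvModifyVal "attention_mask" (pvCell sequence_len p.1) st1 else st1
      let st3 := if (List.lookup "labels" st2).isSome then
        pvModifyVal "labels" (pvCell sequence_len p.1) st2 else st2
      if (List.lookup "position_ids" st3).isSome then
        pvModifyVal "position_ids" (pvCell sequence_len p.1) st3 else st3
    else st) sample

-- ===== PORT B =====
-- the module-level PARALLEL_FIELDS tuple of Source B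
def pvFields : List String := ["input_ids", "attention_mask", "labels", "position_ids"]

def truncate_long_seq_alt (sample : List (String × List (List Int))) (sequence_len : Int) :
    List (String × List (List Int)) :=
  -- long_rows = {i for i, seq in enumerate(sample["input_ids"]) if len(seq) > sequence_len}
  let longRows : PySem.Set Int := PySem.Set.ofList
    (((PySem.List.enumerate ((List.lookup "input_ids" sample).getD [])).filter
      (fun p => (p.2.length : Int) > sequence_len)).map Prod.fst)
  -- for key, col in sample.items(): if key in PARALLEL_FIELDS: sample[key] = [rebuilt column]
  -- (each present key is overwritten in place exactly once: a map over the entries — exact for the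
  -- distinct keys a Python dict presents; Pre_ excludes duplicate-key association lists)
  sample.map (fun kv =>
    if kv.1 ∈ pvFields then
      (kv.1, (PySem.List.enumerate kv.2).map (fun p =>
        if p.1 ∈ longRows then PySem.List.slice p.2 none (some sequence_len) else p.2))
    else kv)

-- ===== PRECONDITION & SPEC =====
-- Pre_ excludes (a) a sample without "input_ids" (Python A raises KeyError), (b) a present parallel
-- field shorter than some too-long row index (Python A raises IndexError), and (c) association
-- lists with duplicate keys, which cannot arise from a Python dict.
def Pre_truncate_long_seq (sample : List (String × List (List Int))) (sequence_len : Int) : Prop :=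
  (sample.map Prod.fst).Nodup ∧
  (List.lookup "input_ids" sample).isSome = true ∧
  ∀ i < ((List.lookup "input_ids" sample).getD []).length,
    ((((List.lookup "input_ids" sample).getD []).getD i []).length : Int) > sequence_len →
    ∀ k ∈ ["attention_mask", "labels", "position_ids"],
      (List.lookup k sample).isSome = true → i < ((List.lookup k sample).getD []).length
instance (sample : List (String × List (List Int))) (sequence_len : Int) :
    Decidable (Pre_truncate_long_seq sample sequence_len) := by
  unfold Pre_truncate_long_seq; infer_instance

def pvWitness_truncate_long_seq : (List (String × List (List Int))) × Int :=
  ([("input_ids", [[1, 2], [3]]), ("labels", [[5, 6], [7]])], 1)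

def Spec_truncate_long_seq (sample : List (String × List (List Int))) (sequence_len : Int)
    (out : List (String × List (List Int))) : Prop := out = truncate_long_seq_alt sample sequence_len
instance (sample : List (String × List (List Int))) (sequence_len : Int)
    (out : List (String × List (List Int))) : Decidable (Spec_truncate_long_seq sample sequence_len out) := by
  unfold Spec_truncate_long_seq; infer_instance

-- ===== CLAIM (what is proved, stated in full; the proofs are below) =====
def Claim_equal_truncate_long_seq : Prop := ∀ (sample : List (String × List (List Int))) (sequence_len : Int), Dom_truncate_long_seq sample sequence_len → Pre_truncate_long_seq sample sequence_len → Spec_truncate_long_seq sample sequence_len (truncate_long_seq sample sequence_len)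

-- ===== LEMMAS AND PROOFS =====

theorem pv_lookup_cons {ν : Type} (k a : String) (v : ν) (tl : List (String × ν)) :
    List.lookup k ((a, v) :: tl) = if k = a then some v else List.lookup k tl := by
  by_cases h : k = a
  · simp [List.lookup, h]
  · rw [List.lookup, if_neg h, beq_eq_false_iff_ne.mpr h]

theorem pv_lookup_modify (k' k : String) (f : List (List Int) → List (List Int))
    (st : List (String × List (List Int))) :
    List.lookup k' (pvModifyVal k f st)
      = if k' = k then Option.map f (List.lookup k' st) else List.lookup k' st := by
  induction st with
  | nil => simp [pvModifyVal]
  | cons hd tl ih =>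
    obtain ⟨a, v⟩ := hd
    by_cases hak : a = k
    · subst hak
      by_cases hk'a : k' = a <;> simp [pvModifyVal, pv_lookup_cons, hk'a]
    · have hka : ¬ k = a := fun h => hak h.symm
      by_cases hk'a : k' = a
      · subst hk'a; simp [pvModifyVal, hak]
      · simp [pvModifyVal, hak, pv_lookup_cons, hk'a, ih]

theorem pv_modify_absent (k : String) (f : List (List Int) → List (List Int))
    (st : List (String × List (List Int))) (h : List.lookup k st = none) :
    pvModifyVal k f st = st := by
  induction st with
  | nil => simp [pvModifyVal]
  | cons hd tl ih =>
    obtain ⟨a, v⟩ := hd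
    rw [pv_lookup_cons] at h
    by_cases hka : k = a
    · simp [hka] at h
    · rw [if_neg hka] at h
      have hak : ¬ a = k := fun hh => hka hh.symm
      simp [pvModifyVal, hak, ih h]

theorem pv_modify_congr (k : String) (f g : List (List Int) → List (List Int))
    (st : List (String × List (List Int)))
    (h : ∀ v, List.lookup k st = some v → f v = g v) :
    pvModifyVal k f st = pvModifyVal k g st := by
  induction st with
  | nil => simp [pvModifyVal]
  | cons hd tl ih =>
    obtain ⟨a, v⟩ := hd
    by_cases hak : a = k
    · subst hak
      have hfv : f v = g v := h v (by simp)
      simp [pvModifyVal, hfv]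
    · have hka : ¬ k = a := fun hh => hak hh.symm
      simp only [pvModifyVal, if_neg hak, List.cons.injEq, true_and]
      exact ih (fun v' hv' => h v' (by rw [pv_lookup_cons, if_neg hka]; exact hv'))

theorem pv_modify_comp (k : String) (f g : List (List Int) → List (List Int))
    (st : List (String × List (List Int))) :
    pvModifyVal k f (pvModifyVal k g st) = pvModifyVal k (fun v => f (g v)) st := by
  induction st with
  | nil => simp [pvModifyVal]
  | cons hd tl ih =>
    obtain ⟨a, v⟩ := hd
    by_cases hak : a = k <;> simp_all [pvModifyVal]

theorem pv_modify_id (k : String) (st : List (String × List (List Int))) :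
    pvModifyVal k (fun v => v) st = st := by
  induction st with
  | nil => simp [pvModifyVal]
  | cons hd tl ih =>
    obtain ⟨a, v⟩ := hd
    by_cases hak : a = k <;> simp_all [pvModifyVal]

theorem pv_modify_comm (k k' : String) (f g : List (List Int) → List (List Int))
    (st : List (String × List (List Int))) (h : k ≠ k') :
    pvModifyVal k f (pvModifyVal k' g st) = pvModifyVal k' g (pvModifyVal k f st) := by
  induction st with
  | nil => simp [pvModifyVal]
  | cons hd tl ih =>
    obtain ⟨a, v⟩ := hd
    by_cases hak : a = k <;> by_cases hak' : a = k' <;> simp_all [pvModifyVal]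

theorem pv_gate (k : String) (f : List (List Int) → List (List Int))
    (st : List (String × List (List Int))) :
    (if (List.lookup k st).isSome then pvModifyVal k f st else st) = pvModifyVal k f st := by
  cases h : List.lookup k st with
  | none => simp [pv_modify_absent k f st h]
  | some v => simp

theorem pv_foldl_filter {α β : Type} (q : β → Prop) [DecidablePred q] (F : α → β → α)
    (l : List β) (a : α) :
    l.foldl (fun s x => if q x then F s x else s) a
      = (l.filter (fun x => decide (q x))).foldl F a := by
  induction l generalizing a with
  | nil => rfl
  | cons x l ih =>
    by_cases hx : q x <;> simp [hx, ih]

theorem pv_modify_foldl (k : String) (g : List (List Int) → Int → List (List Int))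
    (tl : List Int) (st : List (String × List (List Int))) :
    pvModifyVal k (fun c => tl.foldl g c) st
      = tl.foldl (fun s i => pvModifyVal k (fun c => g c i) s) st := by
  induction tl generalizing st with
  | nil => exact pv_modify_id k st
  | cons i tl ih =>
    simp only [List.foldl_cons]
    rw [← ih (pvModifyVal k (fun c => g c i) st), pv_modify_comp]

theorem pv_move {S α : Type} (u : S → S) (v : α → S → S)
    (h : ∀ i s, u (v i s) = v i (u s)) (tl : List α) (s : S) :
    u (tl.foldl (fun s i => v i s) s) = tl.foldl (fun s i => v i s) (u s) := by
  induction tl generalizing s with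
  | nil => rfl
  | cons i tl ih => simp only [List.foldl_cons, ih, h]

theorem pv_exchange {S α : Type} (u v : α → S → S)
    (h : ∀ i j s, u i (v j s) = v j (u i s)) (tl : List α) (s : S) :
    tl.foldl (fun s i => v i (u i s)) s
      = tl.foldl (fun s i => v i s) (tl.foldl (fun s i => u i s) s) := by
  induction tl generalizing s with
  | nil => rfl
  | cons i tl ih =>
    simp only [List.foldl_cons, ih]
    congr 1
    exact (pv_move (v i) u (fun j s => (h j i s).symm) tl (u i s)).symm

-- A's per-row composite step, ungated, with the held row `p.2` in the input_ids update
def pvStepA (sl : Int) (st : List (String × List (List Int))) (p : Int × List Int) :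
    List (String × List (List Int)) :=
  pvModifyVal "position_ids" (pvCell sl p.1)
    (pvModifyVal "labels" (pvCell sl p.1)
      (pvModifyVal "attention_mask" (pvCell sl p.1)
        (pvModifyVal "input_ids"
          (fun col => PySem.List.pySetD col p.1 (PySem.List.slice p.2 none (some sl))) st)))

-- the same step with the input_ids update reading the current cell (depends on the index only)
def pvStepA' (sl : Int) (st : List (String × List (List Int))) (i : Int) :
    List (String × List (List Int)) :=
  pvModifyVal "position_ids" (pvCell sl i)
    (pvModifyVal "labels" (pvCell sl i)
      (pvModifyVal "attention_mask" (pvCell sl i)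
        (pvModifyVal "input_ids" (pvCell sl i) st)))

theorem pv_get_set_ne (xs : List (List Int)) (i j : Int) (v : List Int)
    (hi : 0 ≤ i) (hj : 0 ≤ j) (hne : i ≠ j) :
    PySem.List.pyGet? (PySem.List.pySetD xs i v) j = PySem.List.pyGet? xs j := by
  have hij : i.toNat ≠ j.toNat := fun h => hne (by omega)
  simp only [PySem.List.pySetD, PySem.List.pySet?, PySem.List.pyGet?, PySem.List.pyIdx?,
    if_pos hi, if_pos hj]
  by_cases hilen : i < (xs.length : Int)
  · simp only [if_pos hilen, Option.map_some, Option.getD_some, List.length_set]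
    by_cases hjlen : j < (xs.length : Int)
    · rw [if_pos hjlen]
      simp only [Option.bind_some]
      exact List.getElem?_set_ne hij
    · simp [if_neg hjlen]
  · simp [if_neg hilen]

theorem pv_enum_mem {α : Type} (xs : List α) (s : Int) (p : Int × α)
    (hp : p ∈ PySem.List.enumerate xs s) : ∃ n : Nat, p.1 = s + n ∧ xs[n]? = some p.2 := by
  induction xs generalizing s with
  | nil => simp [PySem.List.enumerate_nil] at hp
  | cons x t ih =>
    rw [PySem.List.enumerate_cons] at hp
    rcases List.mem_cons.mp hp with h | h
    · exact ⟨0, by simp [h]⟩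
    · obtain ⟨n, hn1, hn2⟩ := ih (s + 1) h
      refine ⟨n + 1, ?_, by simpa using hn2⟩
      push_cast
      omega

theorem pv_enum_get (xs : List (List Int)) (p : Int × List Int)
    (hp : p ∈ PySem.List.enumerate xs 0) :
    0 ≤ p.1 ∧ PySem.List.pyGet? xs p.1 = some p.2 := by
  obtain ⟨n, hn1, hn2⟩ := pv_enum_mem xs 0 p hp
  have hlen : n < xs.length := by
    rcases List.getElem?_eq_some_iff.mp hn2 with ⟨h, _⟩; exact h
  refine ⟨by omega, ?_⟩
  rw [hn1]
  simp only [PySem.List.pyGet?, PySem.List.pyIdx?]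
  rw [if_pos (by omega), if_pos (by exact_mod_cast by omega : (0:Int) + n < (xs.length : Int))]
  simpa using hn2

theorem pv_foldA_eq (sl : Int) (pairs : List (Int × List Int))
    (st : List (String × List (List Int)))
    (hnd : (pairs.map Prod.fst).Nodup)
    (hpos : ∀ p ∈ pairs, 0 ≤ p.1)
    (hI : ∀ p ∈ pairs,
      PySem.List.pyGet? ((List.lookup "input_ids" st).getD []) p.1 = some p.2) :
    pairs.foldl (pvStepA sl) st = pairs.foldl (fun s p => pvStepA' sl s p.1) st := by
  induction pairs generalizing st with
  | nil => rfl
  | cons p rest ih =>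
    simp only [List.foldl_cons]
    have hstep : pvStepA sl st p = pvStepA' sl st p.1 := by
      unfold pvStepA pvStepA'
      refine congrArg _ (congrArg _ (congrArg _ ?_))
      refine pv_modify_congr _ _ _ _ (fun v hv => ?_)
      have hI0 := hI p (List.mem_cons_self ..)
      rw [hv] at hI0
      simp only [Option.getD_some] at hI0
      simp [pvCell, hI0]
    rw [hstep]
    refine ih (pvStepA' sl st p.1) ?_ ?_ ?_
    · exact (List.nodup_cons.mp (by simpa using hnd)).2
    · exact fun q hq => hpos q (List.mem_cons_of_mem _ hq)
    · intro q hq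
      have hlook : List.lookup "input_ids" (pvStepA' sl st p.1)
          = Option.map (pvCell sl p.1) (List.lookup "input_ids" st) := by
        unfold pvStepA'
        rw [pv_lookup_modify, if_neg (by decide), pv_lookup_modify, if_neg (by decide),
          pv_lookup_modify, if_neg (by decide), pv_lookup_modify, if_pos rfl]
      rw [hlook]
      cases hc : List.lookup "input_ids" st with
      | none => simpa [hc] using hI q (List.mem_cons_of_mem _ hq)
      | some col =>
        have hIq := hI q (List.mem_cons_of_mem _ hq)
        rw [hc] at hIq
        simp only [Option.getD_some] at hIq
        have hne : p.1 ≠ q.1 := by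
          have h1 : p.1 ∉ rest.map Prod.fst := (List.nodup_cons.mp (by simpa using hnd)).1
          intro h
          exact h1 (h ▸ List.mem_map_of_mem hq)
        simp only [Option.map_some, Option.getD_some, pvCell]
        rw [pv_get_set_ne col p.1 q.1 _ (hpos p (List.mem_cons_self ..))
          (hpos q (List.mem_cons_of_mem _ hq)) hne]
        exact hIq

-- the common field-major canonical form A is reduced to
def pvKeyFold (sl : Int) (tl : List Int) (k : String) (st : List (String × List (List Int))) :
    List (String × List (List Int)) :=
  tl.foldl (fun s i => pvModifyVal k (pvCell sl i) s) st

theorem pvA_canon (sample : List (String × List (List Int))) (sl : Int) :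
    truncate_long_seq sample sl =
      (let tl := ((PySem.List.enumerate ((List.lookup "input_ids" sample).getD [])).filter
        (fun p => (p.2.length : Int) > sl)).map Prod.fst
      pvKeyFold sl tl "position_ids" (pvKeyFold sl tl "labels"
        (pvKeyFold sl tl "attention_mask" (pvKeyFold sl tl "input_ids" sample)))) := by
  unfold truncate_long_seq
  simp only [pv_gate]
  have hbody : (fun (st : List (String × List (List Int))) (p : Int × List Int) =>
      if (p.2.length : Int) > sl then
        pvModifyVal "position_ids" (pvCell sl p.1)
          (pvModifyVal "labels" (pvCell sl p.1)
            (pvModifyVal "attention_mask" (pvCell sl p.1)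
              (pvModifyVal "input_ids"
                (fun col => PySem.List.pySetD col p.1 (PySem.List.slice p.2 none (some sl))) st)))
      else st)
      = (fun st p => if (p.2.length : Int) > sl then pvStepA sl st p else st) := by
    funext st p; rfl
  rw [hbody, pv_foldl_filter (fun p : Int × List Int => (p.2.length : Int) > sl) (pvStepA sl)]
  set ids := (List.lookup "input_ids" sample).getD [] with hids
  set pairs := (PySem.List.enumerate ids).filter (fun p => decide ((p.2.length : Int) > sl))
    with hpairs
  have hsub : List.Sublist (pairs.map Prod.fst) ((PySem.List.enumerate ids).map Prod.fst) :=
    List.Sublist.map Prod.fst List.filter_sublist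
  have hnd : (pairs.map Prod.fst).Nodup := by
    refine List.Sublist.nodup hsub ?_
    have hmap : (PySem.List.enumerate ids 0).map Prod.fst
        = PySem.List.pyRange 0 (0 + ids.length) 1 := PySem.List.map_fst_enumerate ids 0
    rw [hmap]
    exact PySem.List.nodup_pyRange_one 0 (0 + ids.length)
  have hpos : ∀ p ∈ pairs, 0 ≤ p.1 := fun p hp =>
    (pv_enum_get ids p (List.mem_of_mem_filter hp)).1
  have hI : ∀ p ∈ pairs, PySem.List.pyGet? ids p.1 = some p.2 := fun p hp =>
    (pv_enum_get ids p (List.mem_of_mem_filter hp)).2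
  rw [pv_foldA_eq sl pairs sample hnd hpos hI]
  have hfold : List.foldl (fun s p => pvStepA' sl s p.1) sample pairs
      = List.foldl (fun s i => pvStepA' sl s i) sample (pairs.map Prod.fst) := by
    rw [List.foldl_map]
  rw [hfold]
  set tl := pairs.map Prod.fst with htl
  unfold pvKeyFold
  have hc1 : ∀ (i j : Int) (s : List (String × List (List Int))),
      pvModifyVal "input_ids" (pvCell sl i)
        (pvModifyVal "position_ids" (pvCell sl j)
          (pvModifyVal "labels" (pvCell sl j) (pvModifyVal "attention_mask" (pvCell sl j) s)))
      = pvModifyVal "position_ids" (pvCell sl j)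
          (pvModifyVal "labels" (pvCell sl j)
            (pvModifyVal "attention_mask" (pvCell sl j)
              (pvModifyVal "input_ids" (pvCell sl i) s))) := by
    intro i j s
    rw [pv_modify_comm "input_ids" "position_ids" _ _ _ (by decide)]
    refine congrArg _ ?_
    rw [pv_modify_comm "input_ids" "labels" _ _ _ (by decide)]
    refine congrArg _ ?_
    rw [pv_modify_comm "input_ids" "attention_mask" _ _ _ (by decide)]
  have e1 := pv_exchange (fun i s => pvModifyVal "input_ids" (pvCell sl i) s)
    (fun j s => pvModifyVal "position_ids" (pvCell sl j)
      (pvModifyVal "labels" (pvCell sl j) (pvModifyVal "attention_mask" (pvCell sl j) s)))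
    hc1 tl sample
  simp only [] at e1
  simp only [pvStepA']
  rw [e1]
  have hc2 : ∀ (i j : Int) (s : List (String × List (List Int))),
      pvModifyVal "attention_mask" (pvCell sl i)
        (pvModifyVal "position_ids" (pvCell sl j) (pvModifyVal "labels" (pvCell sl j) s))
      = pvModifyVal "position_ids" (pvCell sl j)
          (pvModifyVal "labels" (pvCell sl j) (pvModifyVal "attention_mask" (pvCell sl i) s)) := by
    intro i j s
    rw [pv_modify_comm "attention_mask" "position_ids" _ _ _ (by decide)]
    refine congrArg _ ?_
    rw [pv_modify_comm "attention_mask" "labels" _ _ _ (by decide)]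
  have e2 := pv_exchange (fun i s => pvModifyVal "attention_mask" (pvCell sl i) s)
    (fun j s => pvModifyVal "position_ids" (pvCell sl j) (pvModifyVal "labels" (pvCell sl j) s))
    hc2 tl (tl.foldl (fun s i => pvModifyVal "input_ids" (pvCell sl i) s) sample)
  simp only [] at e2
  rw [e2]
  have hc3 : ∀ (i j : Int) (s : List (String × List (List Int))),
      pvModifyVal "labels" (pvCell sl i) (pvModifyVal "position_ids" (pvCell sl j) s)
      = pvModifyVal "position_ids" (pvCell sl j) (pvModifyVal "labels" (pvCell sl i) s) := by
    intro i j s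
    rw [pv_modify_comm "labels" "position_ids" _ _ _ (by decide)]
  have e3 := pv_exchange (fun i s => pvModifyVal "labels" (pvCell sl i) s)
    (fun j s => pvModifyVal "position_ids" (pvCell sl j) s) hc3 tl
    (tl.foldl (fun s i => pvModifyVal "attention_mask" (pvCell sl i) s)
      (tl.foldl (fun s i => pvModifyVal "input_ids" (pvCell sl i) s) sample))
  simp only [] at e3
  rw [e3]

-- ---- B side: the cell-by-cell fold over too-long indices equals the wholesale column rebuild ----

theorem pv_len_cell (sl i : Int) (col : List (List Int)) :
    (pvCell sl i col).length = col.length := by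
  simp [pvCell, PySem.List.length_pySetD]

theorem pv_len_fold (sl : Int) (tl : List Int) (col : List (List Int)) :
    (tl.foldl (fun c i => pvCell sl i c) col).length = col.length := by
  induction tl generalizing col with
  | nil => rfl
  | cons i tl ih => simp [List.foldl_cons, ih, pv_len_cell]

theorem pv_cell_getElem (sl : Int) (n : Nat) (col : List (List Int)) (j : Nat)
    (hj : j < col.length) :
    (pvCell sl (n : Int) col)[j]'(by rw [pv_len_cell]; exact hj)
      = if (n : Int) = (j : Int) then PySem.List.slice col[j] none (some sl) else col[j] := by
  simp only [pvCell, PySem.List.pySetD_natCast, PySem.List.pyGet?_natCast]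
  rw [List.getElem_set]
  by_cases h : n = j
  · subst h
    simp [List.getElem?_eq_getElem hj]
  · have h' : ¬ ((n : Int) = (j : Int)) := fun hh => h (by exact_mod_cast hh)
    simp [h, h']

theorem pv_fold_getElem (sl : Int) (tl : List Int) (hnd : tl.Nodup) (hpos : ∀ i ∈ tl, 0 ≤ i)
    (col : List (List Int)) (j : Nat) (hj : j < col.length) :
    (tl.foldl (fun c i => pvCell sl i c) col)[j]'(by rw [pv_len_fold]; exact hj)
      = if (j : Int) ∈ tl then PySem.List.slice col[j] none (some sl) else col[j] := by
  induction tl generalizing col with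
  | nil => simp
  | cons i tl ih =>
    obtain ⟨hi_tl, hnd'⟩ := List.nodup_cons.mp hnd
    obtain ⟨n, rfl⟩ : ∃ n : Nat, i = (n : Int) :=
      ⟨i.toNat, by have := hpos i (List.mem_cons_self ..); omega⟩
    have hj' : j < (pvCell sl (n : Int) col).length := by rw [pv_len_cell]; exact hj
    simp only [List.foldl_cons]
    rw [ih hnd' (fun q hq => hpos q (List.mem_cons_of_mem _ hq)) (pvCell sl (n : Int) col) hj']
    simp only [pv_cell_getElem sl n col j hj]
    by_cases hmem : (j : Int) ∈ tl
    · have hne : ¬ ((n : Int) = (j : Int)) := fun h => hi_tl (h ▸ hmem)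
      simp [hmem, hne, List.mem_cons]
    · by_cases hij : (n : Int) = (j : Int)
      · simp [hmem, hij, List.mem_cons]
      · simp [hmem, hij, List.mem_cons]
        exact fun h => absurd (by exact_mod_cast h.symm) hij

theorem pv_G_eq (sl : Int) (tl : List Int) (hnd : tl.Nodup) (hpos : ∀ i ∈ tl, 0 ≤ i)
    (col : List (List Int)) :
    (PySem.List.enumerate col).map
        (fun p => if p.1 ∈ tl then PySem.List.slice p.2 none (some sl) else p.2)
      = tl.foldl (fun c i => pvCell sl i c) col := by
  apply List.ext_getElem
  · simp [PySem.List.length_enumerate, pv_len_fold]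
  · intro j h1 h2
    have hj : j < col.length := by
      simpa [PySem.List.length_enumerate] using h1
    simp only [List.getElem_map, PySem.List.getElem_enumerate]
    rw [pv_fold_getElem sl tl hnd hpos col j hj]
    norm_num

-- ---- B side: applying the four per-key modifies to a duplicate-free mapping is a map ----

theorem pv_lookup_none_of_not_mem {ν : Type} (a : String) (rest : List (String × ν))
    (h : a ∉ rest.map Prod.fst) : List.lookup a rest = none := by
  induction rest with
  | nil => rfl
  | cons hd tl ih =>
    obtain ⟨k, v⟩ := hd
    simp only [List.map_cons, List.mem_cons] at h
    simp only [not_or] at h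
    rw [pv_lookup_cons, if_neg h.1]
    exact ih h.2

theorem pv_foldkeys_nil (F : List (List Int) → List (List Int)) (ks : List String) :
    ks.foldl (fun s k => pvModifyVal k F s) [] = [] := by
  induction ks with
  | nil => rfl
  | cons k ks ih => simpa [pvModifyVal] using ih

theorem pv_foldkeys_cons (F : List (List Int) → List (List Int)) (ks : List String)
    (hks : ks.Nodup) (a : String) (v : List (List Int)) (rest : List (String × List (List Int)))
    (hra : List.lookup a rest = none) :
    ks.foldl (fun s k => pvModifyVal k F s) ((a, v) :: rest)
      = (a, if a ∈ ks then F v else v) :: ks.foldl (fun s k => pvModifyVal k F s) rest := by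
  induction ks generalizing v rest with
  | nil => simp
  | cons k ks ih =>
    obtain ⟨hk, hks'⟩ := List.nodup_cons.mp hks
    simp only [List.foldl_cons]
    by_cases hak : a = k
    · subst hak
      rw [show pvModifyVal a F ((a, v) :: rest) = (a, F v) :: rest by simp [pvModifyVal]]
      rw [ih hks' (F v) rest hra, pv_modify_absent a F rest hra]
      simp [hk]
    · rw [show pvModifyVal k F ((a, v) :: rest) = (a, v) :: pvModifyVal k F rest by
        simp [pvModifyVal, hak]]
      rw [ih hks' v (pvModifyVal k F rest) (by rw [pv_lookup_modify, if_neg hak]; exact hra)]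
      simp [List.mem_cons, hak]

theorem pv_foldkeys_map (F : List (List Int) → List (List Int)) (ks : List String)
    (hks : ks.Nodup) (st : List (String × List (List Int))) (hst : (st.map Prod.fst).Nodup) :
    ks.foldl (fun s k => pvModifyVal k F s) st
      = st.map (fun kv => if kv.1 ∈ ks then (kv.1, F kv.2) else kv) := by
  induction st with
  | nil => exact pv_foldkeys_nil F ks
  | cons hd rest ih =>
    obtain ⟨a, v⟩ := hd
    have hst' : (a :: rest.map Prod.fst).Nodup := by simpa using hst
    obtain ⟨ha, hrest⟩ := List.nodup_cons.mp hst'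
    rw [pv_foldkeys_cons F ks hks a v rest (pv_lookup_none_of_not_mem a rest ha), ih hrest]
    by_cases h : a ∈ ks <;> simp [h]

-- ===== VERDICT (by name: the statement is the Claim_ definition above) =====
theorem truncate_long_seq_spec : Claim_equal_truncate_long_seq := by
  intro sample sl _hdom hpre
  unfold Spec_truncate_long_seq
  obtain ⟨hnodup, -, -⟩ := hpre
  rw [pvA_canon]
  unfold truncate_long_seq_alt
  simp only []
  set ids := (List.lookup "input_ids" sample).getD [] with hids
  set tl := ((PySem.List.enumerate ids).filter
    (fun p => decide ((p.2.length : Int) > sl))).map Prod.fst with htl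
  have hndtl : tl.Nodup := by
    refine List.Sublist.nodup (List.Sublist.map Prod.fst List.filter_sublist) ?_
    rw [PySem.List.map_fst_enumerate ids 0]
    exact PySem.List.nodup_pyRange_one 0 (0 + ids.length)
  have hpostl : ∀ i ∈ tl, 0 ≤ i := by
    intro i hi
    rw [htl] at hi
    obtain ⟨p, hp, rfl⟩ := List.mem_map.mp hi
    exact (pv_enum_get ids p (List.mem_of_mem_filter hp)).1
  simp only [PySem.Set.ofList_eq_self_of_nodup tl hndtl]
  have hKF : ∀ (k : String) (st : List (String × List (List Int))),
      pvKeyFold sl tl k st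
        = pvModifyVal k (fun c => tl.foldl (fun c i => pvCell sl i c) c) st := by
    intro k st
    exact (pv_modify_foldl k (fun c i => pvCell sl i c) tl st).symm
  rw [hKF, hKF, hKF, hKF]
  have hfold : pvModifyVal "position_ids" (fun c => tl.foldl (fun c i => pvCell sl i c) c)
      (pvModifyVal "labels" (fun c => tl.foldl (fun c i => pvCell sl i c) c)
        (pvModifyVal "attention_mask" (fun c => tl.foldl (fun c i => pvCell sl i c) c)
          (pvModifyVal "input_ids" (fun c => tl.foldl (fun c i => pvCell sl i c) c) sample)))
      = pvFields.foldl
          (fun s k => pvModifyVal k (fun c => tl.foldl (fun c i => pvCell sl i c) c) s)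
          sample := by
    simp [pvFields]
  rw [hfold,
    pv_foldkeys_map (fun c => tl.foldl (fun c i => pvCell sl i c) c) pvFields
      (by decide) sample hnodup]
  simp only [pv_G_eq sl tl hndtl hpostl]
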